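-- pv_equiv track=rewrite | github.com/rlnasuti/kaggle-space-titanic | train-tensorflow.py | name_to_vector
-- ===== SOURCE A (Python) =====
-- def name_to_vector(name):
--     alphabet = "abcdefghijklmnopqrstuvwxyz"
--     vector = [0] * len(alphabet)
--     for letter in name.lower():
--         if letter in alphabet:
--             index = alphabet.index(letter)
--             vector[index] = 1
--     return vector
-- ===== SOURCE B (Python) =====
-- def name_to_vector(name):
--     present = set(name.lower())
--     return [1 if chr(ord('a') + i) in present else 0 for i in range(26)]
-- ===== Notes on version B (the rewrite author's own statement) =====
-- stated objective: faster
-- what changed: B scans the name once into a set and then iterates over the 26 alphabet positions to emit the vector, removing A's per-character substring test and alphabet.index scan.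
import Mathlib
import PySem

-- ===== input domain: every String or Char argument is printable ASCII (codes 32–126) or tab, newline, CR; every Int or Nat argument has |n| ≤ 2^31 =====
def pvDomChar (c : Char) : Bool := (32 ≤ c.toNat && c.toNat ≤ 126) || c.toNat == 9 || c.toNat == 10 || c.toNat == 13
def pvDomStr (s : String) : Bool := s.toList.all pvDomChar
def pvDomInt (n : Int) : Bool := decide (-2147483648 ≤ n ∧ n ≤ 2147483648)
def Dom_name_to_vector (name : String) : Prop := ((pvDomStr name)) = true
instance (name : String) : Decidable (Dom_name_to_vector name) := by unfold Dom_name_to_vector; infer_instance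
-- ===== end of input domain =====

-- B scans the name once into a set, then emits the 26-dim vector by iterating over the
-- alphabet positions, instead of marking indices while scanning the name (objective: alternative).

-- ===== PORT A =====
def alphaChars : List Char := "abcdefghijklmnopqrstuvwxyz".toList

-- Python's 'letter in alphabet' is a substring test; for a single character it is exactly
-- list membership on alphabet's characters, and alphabet.index(letter) is the first index.
def name_to_vector (name : String) : List Int :=
  (PySem.Str.lower name).toList.foldl
    (fun vector letter =>
      if letter ∈ alphaChars then
        let index := (PySem.List.index? alphaChars letter).getD 0
        PySem.List.pySetD vector (index : Int) 1
      else vector)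
    (List.replicate 26 0)

-- ===== PORT B =====
def name_to_vector_alt (name : String) : List Int :=
  let present : PySem.Set Char := PySem.Set.ofList (PySem.Str.lower name).toList
  (PySem.List.pyRange 0 26 1).map
    (fun i => if PySem.Set.contains present (Char.ofNat (97 + i).toNat) then (1 : Int) else 0)

-- ===== PRECONDITION & SPEC =====
def Spec_name_to_vector (name : String) (out : List Int) : Prop := out = name_to_vector_alt name
instance (name : String) (out : List Int) : Decidable (Spec_name_to_vector name out) := by unfold Spec_name_to_vector; infer_instance

-- ===== CLAIM (what is proved, stated in full; the proofs are below) =====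
def Claim_equal_name_to_vector : Prop := ∀ (name : String), Dom_name_to_vector name → Spec_name_to_vector name (name_to_vector name)

-- ===== LEMMAS AND PROOFS =====

-- setting position index?(c) of a mapped nodup list rewrites the image of c only
theorem set_map_index (f : Char → Int) (l : List Char) (hn : l.Nodup) (c : Char) (hc : c ∈ l) :
    (l.map f).set ((PySem.List.index? l c).getD 0) 1 = l.map (fun a => if a = c then 1 else f a) := by
  induction l with
  | nil => cases hc
  | cons x t ih =>
    rcases List.nodup_cons.mp hn with ⟨hx, hnt⟩
    by_cases hxc : x = c
    · subst hxc
      rw [PySem.List.index?_cons_self]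
      simp only [Option.getD_some, List.map_cons, List.set_cons_zero, if_true]
      congr 1
      exact (List.map_congr_left (fun a ha => by
        have : a ≠ x := fun h => hx (h ▸ ha)
        simp [this])).symm
    · have hct : c ∈ t := by
        rcases List.mem_cons.mp hc with h | h
        · exact absurd h.symm hxc
        · exact h
      obtain ⟨k, hk⟩ := Option.isSome_iff_exists.mp ((PySem.List.index?_isSome_iff t c).mpr hct)
      rw [PySem.List.index?_cons_of_ne _ hxc, hk]
      simp only [Option.map_some, Option.getD_some, List.map_cons, List.set_cons_succ, hxc]
      congr 1
      have := ih hnt hct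
      rwa [hk] at this

-- A's loop over the name, started from any mapped vector over the alphabet
theorem foldA (cs : List Char) (f : Char → Int) :
    cs.foldl
      (fun vector letter =>
        if letter ∈ alphaChars then
          let index := (PySem.List.index? alphaChars letter).getD 0
          PySem.List.pySetD vector (index : Int) 1
        else vector)
      (alphaChars.map f)
    = alphaChars.map (fun a => if a ∈ cs then 1 else f a) := by
  simp only [PySem.List.pySetD_natCast]
  induction cs generalizing f with
  | nil => simp
  | cons c cs ih =>
    simp only [List.foldl_cons]
    by_cases hc : c ∈ alphaChars
    · have hnd : alphaChars.Nodup := by decide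
      rw [if_pos hc, set_map_index f alphaChars hnd c hc, ih]
      exact List.map_congr_left (fun a _ => by
        by_cases h1 : a ∈ cs <;> by_cases h2 : a = c <;> simp [h1, h2])
    · rw [if_neg hc, ih]
      exact List.map_congr_left (fun a ha => by
        have : a ≠ c := fun h => hc (h ▸ ha)
        simp [this])

-- B equals the indicator map over the alphabet
theorem altB (name : String) :
    name_to_vector_alt name
      = alphaChars.map (fun a => if a ∈ (PySem.Str.lower name).toList then 1 else 0) := by
  unfold name_to_vector_alt
  have hchars : (PySem.List.pyRange 0 26 1).map (fun i => Char.ofNat (97 + i).toNat) = alphaChars := by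
    decide
  calc (PySem.List.pyRange 0 26 1).map
        (fun i => if PySem.Set.contains (PySem.Set.ofList (PySem.Str.lower name).toList) (Char.ofNat (97 + i).toNat) then (1 : Int) else 0)
      = ((PySem.List.pyRange 0 26 1).map (fun i => Char.ofNat (97 + i).toNat)).map
        (fun a => if PySem.Set.contains (PySem.Set.ofList (PySem.Str.lower name).toList) a then (1 : Int) else 0) := by
        rw [List.map_map]
        rfl
    _ = alphaChars.map (fun a => if a ∈ (PySem.Str.lower name).toList then 1 else 0) := by
        rw [hchars]
        exact List.map_congr_left (fun a _ => by
          simp [PySem.Set.contains, PySem.Set.mem_ofList])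

-- ===== VERDICT (by name: the statement is the Claim_ definition above) =====
theorem name_to_vector_spec : Claim_equal_name_to_vector := by
  intro name _
  unfold Spec_name_to_vector name_to_vector
  rw [altB name]
  have hrep : (List.replicate 26 (0 : Int)) = alphaChars.map (fun _ => 0) := by decide
  rw [hrep, foldA]
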